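-- pv_equiv track=rewrite | github.com/watnoffin/Binary-Brains---Inspectron | pages/mainpage.py | parse_analysis_results
-- ===== SOURCE A (Python) =====
-- def parse_analysis_results(analysis_text):
--     """Parses the analysis text and returns a list of issues."""
--     issues = []
--     current_issue = {}
--     lines = analysis_text.split('\n')
--
--     for line in lines:
--         line = line.strip()
--         if line.startswith('Issue'):
--             if current_issue and all(
--                     k in current_issue
--                     for k in ['type', 'location', 'severity', 'fix','expert','estimated_cost']):
--                 issues.append(current_issue.copy())
--             current_issue = {}
--         elif ':' in line:
--             key, value = line.split(':', 1)
--             key = key.strip().lower()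
--             value = value.strip()
--
--             if 'type' in key:
--                 current_issue['type'] = value
--             elif 'location' in key:
--                 current_issue['location'] = value
--             elif 'severity' in key:
--                 current_issue['severity'] = value
--             elif 'fix' in key:
--                 current_issue['fix'] = value
--             elif 'expert' in key:
--                 current_issue['expert'] = value
--             elif 'estimated cost' in key:
--                 current_issue['estimated_cost'] = value
--
--
--     if current_issue and all(k in current_issue
--                              for k in ['type', 'location', 'severity', 'fix', 'expert','estimated_cost']):
--         issues.append(current_issue)
--
--     if not issues:
--         issues = [{
--             "type": "General Observation",
--             "location": "Visible areas",
--             "severity": "Low",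
--             "fix": "Regular maintenance recommended",
--         }]
--
--     return issues
-- ===== SOURCE B (Python) =====
-- REQUIRED = ['type', 'location', 'severity', 'fix', 'expert', 'estimated_cost']
--
-- FALLBACK = {
--     "type": "General Observation",
--     "location": "Visible areas",
--     "severity": "Low",
--     "fix": "Regular maintenance recommended",
-- }
--
--
-- def _to_issue(segment):
--     """Build one issue dict from the (already stripped) lines of a segment."""
--     d = {}
--     for s in segment:
--         if ':' in s:
--             key, value = s.split(':', 1)
--             key = key.strip().lower()
--             value = value.strip()
--             if 'type' in key:
--                 d['type'] = value
--             elif 'location' in key: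
--                 d['location'] = value
--             elif 'severity' in key:
--                 d['severity'] = value
--             elif 'fix' in key:
--                 d['fix'] = value
--             elif 'expert' in key:
--                 d['expert'] = value
--             elif 'estimated cost' in key:
--                 d['estimated_cost'] = value
--     return d
--
--
-- def parse_analysis_results(analysis_text):
--     """Parses the analysis text and returns a list of issues."""
--     # Phase 1: partition the stripped lines into segments at 'Issue' markers
--     # (the leading segment before the first marker is kept).
--     segments = []
--     cur = []
--     for line in analysis_text.split('\n'):
--         s = line.strip()
--         if s.startswith('Issue'):
--             segments.append(cur)
--             cur = []
--         else:
--             cur.append(s)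
--     segments.append(cur)
--     # Phase 2: map each segment to a dict and keep only the complete ones.
--     issues = [d for d in map(_to_issue, segments)
--               if all(k in d for k in REQUIRED)]
--     return issues or [dict(FALLBACK)]
-- ===== Notes on version B (the rewrite author's own statement) =====
-- stated objective: alternative
-- what changed: Replaces A's single pass with interleaved mutable issue/flush state by a two-phase decomposition: first partition the stripped lines into segments at the issue-marker lines, then map each segment to a dict and filter the complete ones.
import Mathlib
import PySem

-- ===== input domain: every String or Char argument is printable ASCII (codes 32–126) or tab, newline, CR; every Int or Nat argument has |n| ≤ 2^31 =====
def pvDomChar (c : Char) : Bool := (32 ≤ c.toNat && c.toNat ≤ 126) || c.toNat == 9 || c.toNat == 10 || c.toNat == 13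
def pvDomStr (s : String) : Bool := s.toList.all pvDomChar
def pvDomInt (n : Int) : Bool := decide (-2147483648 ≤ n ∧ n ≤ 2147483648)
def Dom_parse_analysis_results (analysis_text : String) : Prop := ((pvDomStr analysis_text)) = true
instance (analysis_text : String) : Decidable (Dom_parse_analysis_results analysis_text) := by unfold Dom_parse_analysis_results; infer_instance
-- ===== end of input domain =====

-- B re-implements A by a two-phase decomposition (partition into segments, then map+filter)
-- instead of A's single pass with interleaved flush state; same cost, proved equal on all inputs.

-- shared by both ports: the required keys, the fallback dict, and the elif chain that both
-- Pythons contain verbatim (split on first ':', strip+lower the key, assign by substring test)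
def pvRequired : List String := ["type", "location", "severity", "fix", "expert", "estimated_cost"]

def pvFallback : List (String × String) :=
  [("type", "General Observation"), ("location", "Visible areas"),
   ("severity", "Low"), ("fix", "Regular maintenance recommended")]

def pvAssign (d : PySem.Dict String String) (key value : String) : PySem.Dict String String :=
  if PySem.Str.isIn "type" key then d.insert "type" value
  else if PySem.Str.isIn "location" key then d.insert "location" value
  else if PySem.Str.isIn "severity" key then d.insert "severity" value
  else if PySem.Str.isIn "fix" key then d.insert "fix" value
  else if PySem.Str.isIn "expert" key then d.insert "expert" value
  else if PySem.Str.isIn "estimated cost" key then d.insert "estimated_cost" value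
  else d

-- the body "if ':' in line: key, value = line.split(':', 1); …" shared by both Pythons
def pvLineStep (d : PySem.Dict String String) (line : String) : PySem.Dict String String :=
  if PySem.Str.isIn ":" line then
    match PySem.Str.splitMax? line ":" 1 with
    | some (k :: v :: _) => pvAssign d (PySem.Str.lower (PySem.Str.strip k)) (PySem.Str.strip v)
    | _ => d  -- unreachable: ':' ∈ line gives exactly two pieces
  else d

-- ===== PORT A =====
-- single fold over the lines carrying (issues so far, current_issue)
def pvStepA (st : List (PySem.Dict String String) × PySem.Dict String String) (line : String) :
    List (PySem.Dict String String) × PySem.Dict String String :=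
  let line := PySem.Str.strip line
  if PySem.Str.startswith line "Issue" then
    (if !st.2.items.isEmpty && pvRequired.all st.2.contains then st.1 ++ [st.2] else st.1,
     PySem.Dict.empty)
  else
    (st.1, pvLineStep st.2 line)

def parse_analysis_results (analysis_text : String) : List (List (String × String)) :=
  let lines := (PySem.Str.split? analysis_text "\n").getD []
  let st := lines.foldl pvStepA ([], PySem.Dict.empty)
  let issues :=
    if !st.2.items.isEmpty && pvRequired.all st.2.contains then st.1 ++ [st.2] else st.1
  let issues := if issues.isEmpty then [PySem.Dict.ofList pvFallback] else issues
  issues.map PySem.Dict.items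

-- ===== PORT B =====
-- phase 1: partition the stripped lines into segments at 'Issue' markers
def pvStepB (st : List (List String) × List String) (line : String) :
    List (List String) × List String :=
  let s := PySem.Str.strip line
  if PySem.Str.startswith s "Issue" then (st.1 ++ [st.2], []) else (st.1, st.2 ++ [s])

-- phase 2: one segment -> one dict
def pvToIssue (seg : List String) : PySem.Dict String String :=
  seg.foldl pvLineStep PySem.Dict.empty

def parse_analysis_results_alt (analysis_text : String) : List (List (String × String)) :=
  let st := ((PySem.Str.split? analysis_text "\n").getD []).foldl pvStepB ([], [])
  let segments := st.1 ++ [st.2]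
  let issues :=
    ((segments.map pvToIssue).filter (fun d => pvRequired.all d.contains)).map PySem.Dict.items
  if issues.isEmpty then [pvFallback] else issues

-- ===== PRECONDITION & SPEC =====
def Spec_parse_analysis_results (analysis_text : String) (out : List (List (String × String))) : Prop := out = parse_analysis_results_alt analysis_text
instance (analysis_text : String) (out : List (List (String × String))) : Decidable (Spec_parse_analysis_results analysis_text out) := by unfold Spec_parse_analysis_results; infer_instance

-- ===== CLAIM (what is proved, stated in full; the proofs are below) =====
def Claim_equal_parse_analysis_results : Prop := ∀ (analysis_text : String), Dom_parse_analysis_results analysis_text → Spec_parse_analysis_results analysis_text (parse_analysis_results analysis_text)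

-- ===== LEMMAS AND PROOFS =====

-- a dict containing all required keys is nonempty, so A's truthiness test is redundant
lemma pv_complete_nonempty (d : PySem.Dict String String)
    (h : pvRequired.all d.contains = true) : d.items.isEmpty = false := by
  have ht : d.contains "type" = true := by
    simp [pvRequired, List.all_cons] at h; exact h.1
  rcases d with ⟨items⟩
  cases items with
  | nil => simp [PySem.Dict.contains] at ht
  | cons a l => simp

lemma pv_flush_cond (d : PySem.Dict String String) :
    (!d.items.isEmpty && pvRequired.all d.contains) = pvRequired.all d.contains := by
  by_cases h : pvRequired.all d.contains = true
  · simp [h, pv_complete_nonempty d h]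
  · simp [eq_false_of_ne_true h]

-- loop invariant: A's fold state is the image of B's fold state
lemma pv_loop (ls : List String) (segs : List (List String)) (curseg : List String) :
    ls.foldl pvStepA
      ((segs.map pvToIssue).filter (fun d => pvRequired.all d.contains), pvToIssue curseg)
      = (((ls.foldl pvStepB (segs, curseg)).1.map pvToIssue).filter
           (fun d => pvRequired.all d.contains),
         pvToIssue (ls.foldl pvStepB (segs, curseg)).2) := by
  induction ls generalizing segs curseg with
  | nil => simp
  | cons line rest ih =>
    simp only [List.foldl_cons]
    by_cases h : PySem.Str.startswith (PySem.Str.strip line) "Issue" = true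
    · have hA : pvStepA
          ((segs.map pvToIssue).filter (fun d => pvRequired.all d.contains), pvToIssue curseg) line
          = (((segs ++ [curseg]).map pvToIssue).filter (fun d => pvRequired.all d.contains),
             pvToIssue []) := by
        simp only [pvStepA, h, if_true, pv_flush_cond, List.map_append, List.map_cons,
          List.map_nil, List.filter_append]
        rcases hb : pvRequired.all ((pvToIssue curseg)).contains with _ | _ <;>
          simp only [pvToIssue] at hb ⊢ <;> simp [hb, List.filter]
      have hB : pvStepB (segs, curseg) line = (segs ++ [curseg], []) := by
        simp only [pvStepB, h, if_true]
      rw [hA, hB, ih]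
    · have h' : PySem.Str.startswith (PySem.Str.strip line) "Issue" = false :=
        eq_false_of_ne_true h
      have hA : pvStepA
          ((segs.map pvToIssue).filter (fun d => pvRequired.all d.contains), pvToIssue curseg) line
          = ((segs.map pvToIssue).filter (fun d => pvRequired.all d.contains),
             pvToIssue (curseg ++ [PySem.Str.strip line])) := by
        simp only [pvStepA, h']
        simp [pvToIssue]
      have hB : pvStepB (segs, curseg) line = (segs, curseg ++ [PySem.Str.strip line]) := by
        simp only [pvStepB, h']
        simp
      rw [hA, hB, ih]

-- ===== VERDICT (by name: the statement is the Claim_ definition above) =====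
theorem parse_analysis_results_spec : Claim_equal_parse_analysis_results := by
  intro s _
  unfold Spec_parse_analysis_results
  show parse_analysis_results s = parse_analysis_results_alt s
  simp only [parse_analysis_results, parse_analysis_results_alt]
  have hinit : (([], PySem.Dict.empty) :
      List (PySem.Dict String String) × PySem.Dict String String)
      = ((([] : List (List String)).map pvToIssue).filter (fun d => pvRequired.all d.contains),
         pvToIssue []) := by
    simp [pvToIssue]
  rw [hinit, pv_loop]
  set st := ((PySem.Str.split? s "\n").getD []).foldl pvStepB ([], []) with hst
  rw [pv_flush_cond]
  have hfin : (if pvRequired.all (pvToIssue st.2).contains = true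
        then ((st.1.map pvToIssue).filter (fun d => pvRequired.all d.contains)) ++ [pvToIssue st.2]
        else (st.1.map pvToIssue).filter (fun d => pvRequired.all d.contains))
      = (((st.1 ++ [st.2]).map pvToIssue).filter (fun d => pvRequired.all d.contains)) := by
    by_cases hc : pvRequired.all (pvToIssue st.2).contains = true
    · simp [List.filter_append, List.filter, hc]
    · simp [List.filter_append, List.filter, eq_false_of_ne_true hc]
  rw [hfin]
  cases hL : (((st.1 ++ [st.2]).map pvToIssue).filter (fun d => pvRequired.all d.contains)) with
  | nil =>
    simp only [List.isEmpty_nil, if_true, List.map_cons, List.map_nil]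
    decide
  | cons a l => simp
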